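-- pv_equiv track=rewrite | github.com/JeevanMKJ/cosc_github | chapter_8/assignments/assignment_ch8_5.py | get_letter_index
-- ===== SOURCE A (Python) =====
-- def get_letter_index(user_phone, index):
--     abc_list = [["A", "B", "C"],
--                 ["D", "E", "F"],
--                 ["G", "H", "I"],
--                 ["J", "K", "L"],
--                 ["M", "N", "O"],
--                 ["P", "Q", "R", "S"],
--                 ["T", "U", "V"],
--                 ["W", "X", "Y", "Z"]]
--     index_shift_factor = 2
--     for r in range(len(abc_list)):
--         for c in range(len(abc_list[r])):
--             if user_phone[index] in abc_list[r][c]: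
--                 user_phone_index = r + index_shift_factor
--                 return user_phone_index
-- ===== SOURCE B (Python) =====
-- DIGITS = [2, 2, 2, 3, 3, 3, 4, 4, 4, 5, 5, 5, 6, 6, 6, 7, 7, 7, 7, 8, 8, 8, 9, 9, 9, 9]
--
--
-- def get_letter_index(user_phone, index):
--     pos = ord(user_phone[index]) - ord("A")
--     if 0 <= pos < 26:
--         return DIGITS[pos]
--     return None
-- ===== Notes on version B (the rewrite author's own statement) =====
-- stated objective: idiomatic
-- what changed: Replaces the nested scan over an 8-row letter table by O(1) arithmetic: pos = ord(ch) - ord('A'), a range guard, and direct indexing into a flat 26-entry digit table.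
import Mathlib
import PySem

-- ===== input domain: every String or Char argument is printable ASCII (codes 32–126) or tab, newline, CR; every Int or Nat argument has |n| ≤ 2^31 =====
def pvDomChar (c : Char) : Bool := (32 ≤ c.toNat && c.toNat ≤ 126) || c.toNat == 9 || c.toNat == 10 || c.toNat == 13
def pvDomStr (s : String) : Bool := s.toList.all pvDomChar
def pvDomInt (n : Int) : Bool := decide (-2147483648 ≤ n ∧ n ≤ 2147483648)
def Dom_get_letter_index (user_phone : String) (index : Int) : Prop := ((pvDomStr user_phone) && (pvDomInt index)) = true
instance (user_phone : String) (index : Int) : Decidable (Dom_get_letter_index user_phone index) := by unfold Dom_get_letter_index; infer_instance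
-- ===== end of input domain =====

-- B replaces A's nested scan over a nested letter table by O(1) arithmetic indexing into a flat digit table (constant-factor simplification).

-- ===== PORT A =====
def abcListA : List (List String) :=
  [["A", "B", "C"], ["D", "E", "F"], ["G", "H", "I"], ["J", "K", "L"],
   ["M", "N", "O"], ["P", "Q", "R", "S"], ["T", "U", "V"], ["W", "X", "Y", "Z"]]

-- inner loop: 'for c in range(len(abc_list[r])): if user_phone[index] in abc_list[r][c]: return …'
def innerA (ch : Char) : List String → Bool
  | [] => false
  | cell :: rest => if PySem.Chars.isIn [ch] cell.toList then true else innerA ch rest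

-- outer loop over rows, r counts up from 0; returns r + index_shift_factor on the first hit
def outerA (ch : Char) : List (List String) → Int → Option Int
  | [], _ => none
  | row :: rest, r => if innerA ch row then some (r + 2) else outerA ch rest (r + 1)

def get_letter_index (user_phone : String) (index : Int) : Option Int :=
  match PySem.Str.pyGet? user_phone index with
  | none => none   -- IndexError in Python; excluded by Pre_
  | some ch => outerA ch abcListA 0

-- ===== PORT B =====
def digitsB : List Int := [2, 2, 2, 3, 3, 3, 4, 4, 4, 5, 5, 5, 6, 6, 6, 7, 7, 7, 7, 8, 8, 8, 9, 9, 9, 9]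

def get_letter_index_alt (user_phone : String) (index : Int) : Option Int :=
  match PySem.Str.pyGet? user_phone index with
  | none => none   -- IndexError in Python; excluded by Pre_
  | some ch =>
    let pos : Int := (ch.toNat : Int) - 65
    if 0 ≤ pos ∧ pos < 26 then PySem.List.pyGet? digitsB pos else none

-- ===== PRECONDITION & SPEC =====
-- Pre_ excludes exactly the indices on which Python's user_phone[index] raises IndexError (in both A and B).
def Pre_get_letter_index (user_phone : String) (index : Int) : Prop :=
  PySem.Raise.InRange user_phone.toList.length index
instance (user_phone : String) (index : Int) : Decidable (Pre_get_letter_index user_phone index) := by unfold Pre_get_letter_index; infer_instance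

def pvWitness_get_letter_index : String × Int := ("HELLO", 1)

def Spec_get_letter_index (user_phone : String) (index : Int) (out : Option Int) : Prop := out = get_letter_index_alt user_phone index
instance (user_phone : String) (index : Int) (out : Option Int) : Decidable (Spec_get_letter_index user_phone index out) := by unfold Spec_get_letter_index; infer_instance

-- ===== CLAIM (what is proved, stated in full; the proofs are below) =====
def Claim_equal_get_letter_index : Prop := ∀ (user_phone : String) (index : Int), Dom_get_letter_index user_phone index → Pre_get_letter_index user_phone index → Spec_get_letter_index user_phone index (get_letter_index user_phone index)

-- ===== LEMMAS AND PROOFS =====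

-- a one-char needle is a substring of a one-char haystack iff the chars are equal
lemma isIn_single (c d : Char) : PySem.Chars.isIn [c] [d] = decide (c = d) := by
  by_cases h : c = d
  · subst h; simp [PySem.Chars.isIn_iff_infix]
  · have hf : PySem.Chars.isIn [c] [d] = false :=
      (PySem.Chars.isIn_eq_false_iff _ _).mpr
        (fun hin => h (List.mem_singleton.mp (hin.sublist.subset (List.mem_singleton_self c))))
    simp [hf, h]

-- A's scan returns None for any character outside A–Z
lemma outerA_none (c : Char) (h : ¬ (65 ≤ c.toNat ∧ c.toNat < 91)) :
    outerA c abcListA 0 = none := by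
  have hA : PySem.Chars.isIn [c] "A".toList = false := by
    rw [show ("A".toList)=['A'] from rfl, isIn_single]
    exact decide_eq_false (fun he => h (by subst he; exact ⟨by decide, by decide⟩))
  have hB : PySem.Chars.isIn [c] "B".toList = false := by
    rw [show ("B".toList)=['B'] from rfl, isIn_single]
    exact decide_eq_false (fun he => h (by subst he; exact ⟨by decide, by decide⟩))
  have hC : PySem.Chars.isIn [c] "C".toList = false := by
    rw [show ("C".toList)=['C'] from rfl, isIn_single]
    exact decide_eq_false (fun he => h (by subst he; exact ⟨by decide, by decide⟩))
  have hD : PySem.Chars.isIn [c] "D".toList = false := by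
    rw [show ("D".toList)=['D'] from rfl, isIn_single]
    exact decide_eq_false (fun he => h (by subst he; exact ⟨by decide, by decide⟩))
  have hE : PySem.Chars.isIn [c] "E".toList = false := by
    rw [show ("E".toList)=['E'] from rfl, isIn_single]
    exact decide_eq_false (fun he => h (by subst he; exact ⟨by decide, by decide⟩))
  have hF : PySem.Chars.isIn [c] "F".toList = false := by
    rw [show ("F".toList)=['F'] from rfl, isIn_single]
    exact decide_eq_false (fun he => h (by subst he; exact ⟨by decide, by decide⟩))
  have hG : PySem.Chars.isIn [c] "G".toList = false := by
    rw [show ("G".toList)=['G'] from rfl, isIn_single]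
    exact decide_eq_false (fun he => h (by subst he; exact ⟨by decide, by decide⟩))
  have hH : PySem.Chars.isIn [c] "H".toList = false := by
    rw [show ("H".toList)=['H'] from rfl, isIn_single]
    exact decide_eq_false (fun he => h (by subst he; exact ⟨by decide, by decide⟩))
  have hI : PySem.Chars.isIn [c] "I".toList = false := by
    rw [show ("I".toList)=['I'] from rfl, isIn_single]
    exact decide_eq_false (fun he => h (by subst he; exact ⟨by decide, by decide⟩))
  have hJ : PySem.Chars.isIn [c] "J".toList = false := by
    rw [show ("J".toList)=['J'] from rfl, isIn_single]
    exact decide_eq_false (fun he => h (by subst he; exact ⟨by decide, by decide⟩))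
  have hK : PySem.Chars.isIn [c] "K".toList = false := by
    rw [show ("K".toList)=['K'] from rfl, isIn_single]
    exact decide_eq_false (fun he => h (by subst he; exact ⟨by decide, by decide⟩))
  have hL : PySem.Chars.isIn [c] "L".toList = false := by
    rw [show ("L".toList)=['L'] from rfl, isIn_single]
    exact decide_eq_false (fun he => h (by subst he; exact ⟨by decide, by decide⟩))
  have hM : PySem.Chars.isIn [c] "M".toList = false := by
    rw [show ("M".toList)=['M'] from rfl, isIn_single]
    exact decide_eq_false (fun he => h (by subst he; exact ⟨by decide, by decide⟩))
  have hN : PySem.Chars.isIn [c] "N".toList = false := by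
    rw [show ("N".toList)=['N'] from rfl, isIn_single]
    exact decide_eq_false (fun he => h (by subst he; exact ⟨by decide, by decide⟩))
  have hO : PySem.Chars.isIn [c] "O".toList = false := by
    rw [show ("O".toList)=['O'] from rfl, isIn_single]
    exact decide_eq_false (fun he => h (by subst he; exact ⟨by decide, by decide⟩))
  have hP : PySem.Chars.isIn [c] "P".toList = false := by
    rw [show ("P".toList)=['P'] from rfl, isIn_single]
    exact decide_eq_false (fun he => h (by subst he; exact ⟨by decide, by decide⟩))
  have hQ : PySem.Chars.isIn [c] "Q".toList = false := by
    rw [show ("Q".toList)=['Q'] from rfl, isIn_single]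
    exact decide_eq_false (fun he => h (by subst he; exact ⟨by decide, by decide⟩))
  have hR : PySem.Chars.isIn [c] "R".toList = false := by
    rw [show ("R".toList)=['R'] from rfl, isIn_single]
    exact decide_eq_false (fun he => h (by subst he; exact ⟨by decide, by decide⟩))
  have hS : PySem.Chars.isIn [c] "S".toList = false := by
    rw [show ("S".toList)=['S'] from rfl, isIn_single]
    exact decide_eq_false (fun he => h (by subst he; exact ⟨by decide, by decide⟩))
  have hT : PySem.Chars.isIn [c] "T".toList = false := by
    rw [show ("T".toList)=['T'] from rfl, isIn_single]
    exact decide_eq_false (fun he => h (by subst he; exact ⟨by decide, by decide⟩))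
  have hU : PySem.Chars.isIn [c] "U".toList = false := by
    rw [show ("U".toList)=['U'] from rfl, isIn_single]
    exact decide_eq_false (fun he => h (by subst he; exact ⟨by decide, by decide⟩))
  have hV : PySem.Chars.isIn [c] "V".toList = false := by
    rw [show ("V".toList)=['V'] from rfl, isIn_single]
    exact decide_eq_false (fun he => h (by subst he; exact ⟨by decide, by decide⟩))
  have hW : PySem.Chars.isIn [c] "W".toList = false := by
    rw [show ("W".toList)=['W'] from rfl, isIn_single]
    exact decide_eq_false (fun he => h (by subst he; exact ⟨by decide, by decide⟩))
  have hX : PySem.Chars.isIn [c] "X".toList = false := by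
    rw [show ("X".toList)=['X'] from rfl, isIn_single]
    exact decide_eq_false (fun he => h (by subst he; exact ⟨by decide, by decide⟩))
  have hY : PySem.Chars.isIn [c] "Y".toList = false := by
    rw [show ("Y".toList)=['Y'] from rfl, isIn_single]
    exact decide_eq_false (fun he => h (by subst he; exact ⟨by decide, by decide⟩))
  have hZ : PySem.Chars.isIn [c] "Z".toList = false := by
    rw [show ("Z".toList)=['Z'] from rfl, isIn_single]
    exact decide_eq_false (fun he => h (by subst he; exact ⟨by decide, by decide⟩))
  simp only [outerA, innerA, abcListA, hA, hB, hC, hD, hE, hF, hG, hH, hI, hJ, hK, hL, hM, hN, hO, hP, hQ, hR, hS, hT, hU, hV, hW, hX, hY, hZ, Bool.false_eq_true, if_false]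

-- per-character agreement of the two table lookups
lemma char_agree (c : Char) :
    outerA c abcListA 0 =
      (if 0 ≤ (c.toNat : Int) - 65 ∧ (c.toNat : Int) - 65 < 26
       then PySem.List.pyGet? digitsB ((c.toNat : Int) - 65) else none) := by
  by_cases h : 65 ≤ c.toNat ∧ c.toNat < 91
  · obtain ⟨h1, h2⟩ := h
    rw [← Char.ofNat_toNat c]
    set n := c.toNat with hn
    interval_cases n <;> decide
  · rw [if_neg (by omega), outerA_none c h]

-- ===== VERDICT (by name: the statement is the Claim_ definition above) =====
theorem get_letter_index_spec : Claim_equal_get_letter_index := by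
  intro s i hdom hpre
  unfold Spec_get_letter_index get_letter_index get_letter_index_alt
  have hin : PySem.Raise.InRange s.toList.length i := hpre
  have hget : PySem.Str.pyGet? s i = PySem.List.pyGet? s.toList i := by
    simp [pysem]
  obtain ⟨c, hc⟩ : ∃ c, PySem.List.pyGet? s.toList i = some c := by
    rcases h : PySem.List.pyGet? s.toList i with _ | c
    · exact absurd hin ((PySem.List.pyGet?_eq_none_iff s.toList i).mp h)
    · exact ⟨c, rfl⟩
  rw [hget, hc]
  exact char_agree c
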